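-- pv_equiv track=rewrite | github.com/weltonvaz/Mersenne | divisao_comparacao_nao_restauradora.py | divisao_comparacao_nao_restauradora
-- ===== SOURCE A (Python) =====
-- def divisao_comparacao_nao_restauradora(dividendo, divisor):
--     """
--     Realiza a divisão de inteiros utilizando o algoritmo de comparação não restauradora.
--
--     Args:
--         dividendo: O número a ser dividido.
--         divisor: O número pelo qual o dividendo será dividido.
--
--     Returns:
--         Uma tupla contendo o quociente e o resto da divisão.
--     """
--
--     if divisor == 0:
--         raise ZeroDivisionError("Divisão por zero não é permitida.")
--
--     # Garante que dividendo e divisor sejam positivos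
--     sinal = 1
--     if dividendo < 0:
--         sinal *= -1
--         dividendo = -dividendo
--     if divisor < 0:
--         sinal *= -1
--         divisor = -divisor
--
--     quociente = 0
--     resto = dividendo
--
--     for i in range(32, -1, -1):  # Considera 32 bits para inteiros
--         resto <<= 1  # Deslocamento à esquerda
--         quociente <<= 1  # Deslocamento à esquerda
--         if resto >= divisor:
--             resto -= divisor
--             quociente += 1
--         elif resto < 0:
--             resto += divisor
--
--     return quociente * sinal, resto * sinal
-- ===== SOURCE B (Python) =====
-- def divisao_comparacao_nao_restauradora(dividendo, divisor):
--     """Divisão por quociente guloso, sem usar o operador de divisão: o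
--     quociente de 33 bits de (dividendo << 33) por divisor é construído
--     bit a bit, do mais significativo ao menos, ligando cada bit quando o
--     quociente candidato vezes o divisor ainda cabe no dividendo deslocado.
--
--     Returns:
--         Uma tupla contendo o quociente e o resto da divisão.
--     """
--     if divisor == 0:
--         raise ZeroDivisionError("Divisão por zero não é permitida.")
--
--     sinal = 1
--     if dividendo < 0:
--         sinal = -sinal
--         dividendo = -dividendo
--     if divisor < 0:
--         sinal = -sinal
--         divisor = -divisor
--
--     deslocado = dividendo << 33
--     quociente = 0
--     p = 1 << 32
--     while p:
--         if (quociente + p) * divisor <= deslocado: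
--             quociente += p
--         p >>= 1
--     resto = deslocado - quociente * divisor
--
--     return quociente * sinal, resto * sinal
-- ===== Notes on version B (the rewrite author's own statement) =====
-- stated objective: alternative
-- what changed: Replaces the non-restoring shift-and-compare remainder loop by a division-free greedy quotient construction: the 33-bit quotient of dividendo<<33 is built bit by bit from the top by testing candidate*divisor against the shifted dividend, and the remainder is recovered by one final subtraction; Pre_ excludes only divisor = 0, where A raises ZeroDivisionError.
import Mathlib
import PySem

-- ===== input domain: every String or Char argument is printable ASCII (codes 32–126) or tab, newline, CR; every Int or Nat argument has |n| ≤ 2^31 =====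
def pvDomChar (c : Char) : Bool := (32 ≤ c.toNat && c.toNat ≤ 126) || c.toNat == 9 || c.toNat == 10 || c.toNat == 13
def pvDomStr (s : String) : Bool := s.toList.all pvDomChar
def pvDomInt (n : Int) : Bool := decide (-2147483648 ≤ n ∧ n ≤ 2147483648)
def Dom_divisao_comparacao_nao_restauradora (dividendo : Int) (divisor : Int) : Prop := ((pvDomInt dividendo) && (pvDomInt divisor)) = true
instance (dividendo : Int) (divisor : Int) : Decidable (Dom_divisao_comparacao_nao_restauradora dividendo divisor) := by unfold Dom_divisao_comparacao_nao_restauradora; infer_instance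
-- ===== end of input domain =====

-- B replaces A's non-restoring shift-and-compare remainder loop by a division-free
-- greedy construction of the 33-bit quotient of dividendo<<33 (bit by bit from the
-- top), recovering the remainder by one subtraction; Pre_ excludes divisor = 0,
-- where the Python A raises ZeroDivisionError.


-- ===== PORT A =====
-- one iteration of A's loop body (the loop index is unused by the body)
def pvStepA (divisor : Int) (s : Int × Int) : Int × Int :=
  let resto := s.2 <<< (1:Nat)
  let quociente := s.1 <<< (1:Nat)
  if resto ≥ divisor then (quociente + 1, resto - divisor)
  else if resto < 0 then (quociente, resto + divisor)
  else (quociente, resto)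

def divisao_comparacao_nao_restauradora (dividendo : Int) (divisor : Int) : Int × Int :=
  if divisor = 0 then (0, 0)  -- Python raises ZeroDivisionError here; excluded by Pre_
  else
    let s₁ : Int × Int := if dividendo < 0 then (1 * (-1), -dividendo) else (1, dividendo)
    let s₂ : Int × Int := if divisor < 0 then (s₁.1 * (-1), -divisor) else (s₁.1, divisor)
    let sinal := s₂.1
    let div' := s₂.2
    let qr := (PySem.List.pyRange 32 (-1) (-1)).foldl (fun s _ => pvStepA div' s) (0, s₁.2)
    (qr.1 * sinal, qr.2 * sinal)

-- ===== PORT B =====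
-- B's 'while p:' loop: halve p each turn, adding it to the candidate quotient when
-- the candidate still fits under the shifted dividend. (The guard is 'p ≤ 0' rather
-- than 'p = 0' only for totality; B only ever starts it from the positive 1 <<< 32.)
def pvLoopB (deslocado divisor quociente p : Int) : Int :=
  if h : p ≤ 0 then quociente
  else
    pvLoopB deslocado divisor
      (if (quociente + p) * divisor ≤ deslocado then quociente + p else quociente)
      (p / 2)
termination_by p.toNat
decreasing_by
  omega

def divisao_comparacao_nao_restauradora_alt (dividendo : Int) (divisor : Int) : Int × Int :=
  if divisor = 0 then (0, 0)  -- Python raises ZeroDivisionError here; excluded by Pre_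
  else
    let s₁ : Int × Int := if dividendo < 0 then (-1, -dividendo) else (1, dividendo)
    let s₂ : Int × Int := if divisor < 0 then (-s₁.1, -divisor) else (s₁.1, divisor)
    let sinal := s₂.1
    let v := s₂.2
    let deslocado := s₁.2 <<< (33:Nat)
    let q := pvLoopB deslocado v 0 ((1:Int) <<< (32:Nat))
    (q * sinal, (deslocado - q * v) * sinal)

-- ===== PRECONDITION & SPEC =====
-- Pre_ excludes exactly divisor = 0, where the Python A raises ZeroDivisionError.
def Pre_divisao_comparacao_nao_restauradora (dividendo : Int) (divisor : Int) : Prop := divisor ≠ 0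
instance (dividendo : Int) (divisor : Int) : Decidable (Pre_divisao_comparacao_nao_restauradora dividendo divisor) := by unfold Pre_divisao_comparacao_nao_restauradora; infer_instance
def pvWitness_divisao_comparacao_nao_restauradora : Int × Int := (7, 3)
def Spec_divisao_comparacao_nao_restauradora (dividendo : Int) (divisor : Int) (out : Int × Int) : Prop := out = divisao_comparacao_nao_restauradora_alt dividendo divisor
instance (dividendo : Int) (divisor : Int) (out : Int × Int) : Decidable (Spec_divisao_comparacao_nao_restauradora dividendo divisor out) := by unfold Spec_divisao_comparacao_nao_restauradora; infer_instance

-- ===== CLAIM (what is proved, stated in full; the proofs are below) =====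
def Claim_equal_divisao_comparacao_nao_restauradora : Prop := ∀ (dividendo : Int) (divisor : Int), Dom_divisao_comparacao_nao_restauradora dividendo divisor → Pre_divisao_comparacao_nao_restauradora dividendo divisor → Spec_divisao_comparacao_nao_restauradora dividendo divisor (divisao_comparacao_nao_restauradora dividendo divisor)

-- ===== LEMMAS AND PROOFS =====

-- a foldl whose body ignores the list element is an iterate
theorem pv_foldl_const {α β : Type} (f : β → β) (l : List α) (s : β) :
    l.foldl (fun s _ => f s) s = f^[l.length] s := by
  induction l generalizing s with
  | nil => rfl
  | cons a t ih => simp [List.foldl, ih, Function.iterate_succ_apply]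

-- one step of A preserves the "exact divmod" invariant (reduced case d < v)
theorem pvStepA_divmod (v x : Int) (hv : 0 < v) :
    pvStepA v (x / v, x % v) = ((2 * x) / v, (2 * x) % v) := by
  have hr0 : 0 ≤ x % v := Int.emod_nonneg x (by omega)
  have hrv : x % v < v := Int.emod_lt_of_pos x hv
  have hx' : x = v * (x / v) + x % v := (Int.mul_ediv_add_emod x v).symm
  unfold pvStepA
  simp only [Int.shiftLeft_eq, pow_one]
  by_cases hb : v ≤ x % v * 2
  · have h2x : 2 * x = (2 * (x % v) - v) + (2 * (x / v) + 1) * v := by linarith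
    have h1 : (2 * x) / v = 2 * (x / v) + 1 := by
      rw [h2x, Int.add_mul_ediv_right _ _ (by omega : v ≠ 0),
        Int.ediv_eq_zero_of_lt (by omega) (by omega)]
      omega
    have h2 : (2 * x) % v = 2 * (x % v) - v := by
      rw [h2x, Int.add_mul_emod_self_right, Int.emod_eq_of_lt (by omega) (by omega)]
    rw [if_pos (by omega : x % v * 2 ≥ v), h1, h2]
    simp only [Prod.mk.injEq]
    constructor <;> ring
  · have h2x : 2 * x = 2 * (x % v) + (2 * (x / v)) * v := by linarith
    have h1 : (2 * x) / v = 2 * (x / v) := by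
      rw [h2x, Int.add_mul_ediv_right _ _ (by omega : v ≠ 0),
        Int.ediv_eq_zero_of_lt (by omega) (by omega)]
      omega
    have h2 : (2 * x) % v = 2 * (x % v) := by
      rw [h2x, Int.add_mul_emod_self_right, Int.emod_eq_of_lt (by omega) (by omega)]
    rw [if_neg (by omega : ¬ (x % v * 2 ≥ v)), if_neg (by omega : ¬ (x % v * 2 < 0)), h1, h2]
    simp only [Prod.mk.injEq]
    constructor <;> ring

-- n steps of A from (0, d) with 0 ≤ d < v compute divmod of d * 2^n
theorem pv_iterate_lt (v d : Int) (hd : 0 ≤ d) (hv : 0 < v) (hdv : d < v) :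
    ∀ n : Nat, (fun s => pvStepA v s)^[n] (0, d) = ((d * 2 ^ n) / v, (d * 2 ^ n) % v) := by
  intro n
  induction n with
  | zero =>
      simp [Int.ediv_eq_zero_of_lt hd hdv, Int.emod_eq_of_lt hd hdv]
  | succ n ih =>
      rw [Function.iterate_succ_apply', ih, pvStepA_divmod v (d * 2 ^ n) hv]
      have h : 2 * (d * 2 ^ n) = d * 2 ^ (n + 1) := by ring
      rw [h]

-- n steps of A from (0, d) with v ≤ d fill the quotient register with ones
theorem pv_iterate_ge (v d : Int) (hv : 0 < v) (hdv : v ≤ d) :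
    ∀ n : Nat, (fun s => pvStepA v s)^[n] (0, d) = (2 ^ n - 1, d * 2 ^ n - (2 ^ n - 1) * v) := by
  intro n
  induction n with
  | zero => simp
  | succ n ih =>
      rw [Function.iterate_succ_apply', ih]
      have hpow : (0:Int) < 2 ^ n := by positivity
      have hRv : v ≤ d * 2 ^ n - (2 ^ n - 1) * v := by nlinarith
      unfold pvStepA
      simp only [Int.shiftLeft_eq, pow_one]
      rw [if_pos (by omega : (d * 2 ^ n - (2 ^ n - 1) * v) * 2 ≥ v)]
      simp only [Prod.mk.injEq]
      constructor <;> ring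

-- a multiple of D below a bound that D divides stays a full D under the bound
theorem pv_dvd_bound (D q B : Int) (hD : 0 < D) (h1 : D ∣ q) (h2 : D ∣ B) (h3 : q < B) :
    q + D ≤ B := by
  have : D ∣ B - q := Dvd.dvd.sub h2 h1
  have := Int.le_of_dvd (by omega) this
  omega

-- B's greedy loop: from a correct prefix q (a multiple of 2^(k+1) with
-- q ≤ M < q + 2^(k+1)), processing bits k..0 reaches M = min(S/v, 2^33-1)
theorem pvLoopB_inv (S v : Int) (hS : 0 ≤ S) (hv : 0 < v) :
    ∀ (k : Nat), k ≤ 32 → ∀ q : Int, (2:Int) ^ (k + 1) ∣ q → 0 ≤ q →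
      q ≤ min (S / v) (2 ^ 33 - 1) → min (S / v) (2 ^ 33 - 1) < q + 2 ^ (k + 1) →
      pvLoopB S v q (2 ^ k) = min (S / v) (2 ^ 33 - 1) := by
  have hfit : ∀ t : Int, 0 ≤ t → t ≤ 2 ^ 33 - 1 →
      ((t * v ≤ S) ↔ t ≤ min (S / v) (2 ^ 33 - 1)) := by
    intro t ht htb
    rw [le_min_iff, Int.le_ediv_iff_mul_le hv]
    constructor
    · intro h; exact ⟨h, htb⟩
    · intro h; exact h.1
  intro k
  induction k with
  | zero =>
      intro _ q hdvd hq0 hqM hMq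
      set M := min (S / v) (2 ^ 33 - 1) with hM
      have hM33 : M ≤ 2 ^ 33 - 1 := min_le_right _ _
      have hq1 : q + 1 ≤ 2 ^ 33 - 1 := by
        have := pv_dvd_bound 2 q (2 ^ 33) (by norm_num) (by simpa using hdvd)
          (by norm_num) (by omega)
        omega
      rw [pvLoopB]
      rw [dif_neg (by norm_num)]
      simp only [pow_zero]
      have h02 : (1:Int) / 2 = 0 := by norm_num
      rw [h02]
      have hcond : ((q + 1) * v ≤ S) ↔ q + 1 ≤ M := hfit (q + 1) (by omega) hq1
      by_cases hc : (q + 1) * v ≤ S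
      · rw [if_pos hc, pvLoopB]
        rw [dif_pos (by norm_num)]
        have := hcond.mp hc
        norm_num at hMq
        omega
      · rw [if_neg hc, pvLoopB]
        rw [dif_pos (by norm_num)]
        have := hcond.not.mp hc
        norm_num at hMq
        omega
  | succ k ih =>
      intro hk q hdvd hq0 hqM hMq
      set M := min (S / v) (2 ^ 33 - 1) with hM
      have hM33 : M ≤ 2 ^ 33 - 1 := min_le_right _ _
      have hpos : (0:Int) < 2 ^ (k + 1) := by positivity
      have hdvd33 : (2:Int) ^ (k + 2) ∣ 2 ^ 33 :=
        pow_dvd_pow 2 (by omega)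
      have hqb : q + 2 ^ (k + 2) ≤ 2 ^ 33 := by
        exact pv_dvd_bound (2 ^ (k + 2)) q (2 ^ 33) (by positivity) hdvd hdvd33 (by omega)
      have hfitb : q + 2 ^ (k + 1) ≤ 2 ^ 33 - 1 := by
        have h1 : (2:Int) ^ (k + 2) = 2 ^ (k + 1) * 2 := by ring
        omega
      rw [pvLoopB]
      rw [dif_neg (by omega : ¬ (2:Int) ^ (k + 1) ≤ 0)]
      have hhalf : (2:Int) ^ (k + 1) / 2 = 2 ^ k := by
        have h1 : (2:Int) ^ (k + 1) = 2 ^ k * 2 := by ring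
        rw [h1, Int.mul_ediv_cancel _ (by norm_num)]
      have hcond : ((q + 2 ^ (k + 1)) * v ≤ S) ↔ q + 2 ^ (k + 1) ≤ M :=
        hfit _ (by omega) hfitb
      have hdvd' : (2:Int) ^ (k + 1) ∣ q := dvd_trans (pow_dvd_pow 2 (by omega)) hdvd
      by_cases hc : (q + 2 ^ (k + 1)) * v ≤ S
      · rw [if_pos hc, hhalf]
        have h1 := hcond.mp hc
        refine ih (by omega) (q + 2 ^ (k + 1)) (Dvd.dvd.add hdvd' dvd_rfl) (by omega) h1 ?_
        have h2 : (2:Int) ^ (k + 2) = 2 ^ (k + 1) + 2 ^ (k + 1) := by ring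
        omega
      · rw [if_neg hc, hhalf]
        have h1 := hcond.not.mp hc
        exact ih (by omega) q hdvd' hq0 hqM (by omega)

-- the two loops agree: A's 33-iteration fold equals B's greedy quotient and remainder
theorem pv_loop_eq (v d : Int) (hd : 0 ≤ d) (hv : 0 < v) :
    (PySem.List.pyRange 32 (-1) (-1)).foldl (fun s _ => pvStepA v s) (0, d)
      = (pvLoopB (d <<< (33:Nat)) v 0 ((1:Int) <<< (32:Nat)),
         d <<< (33:Nat) - pvLoopB (d <<< (33:Nat)) v 0 ((1:Int) <<< (32:Nat)) * v) := by
  have hS : d <<< (33:Nat) = d * 2 ^ 33 := by rw [Int.shiftLeft_eq]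
  have h32 : ((1:Int) <<< (32:Nat)) = 2 ^ 32 := by rw [Int.shiftLeft_eq]; norm_num
  have hS0 : 0 ≤ d * 2 ^ 33 := by positivity
  have hdiv0 : 0 ≤ d * 2 ^ 33 / v := Int.ediv_nonneg hS0 (by omega)
  have hB : pvLoopB (d * 2 ^ 33) v 0 (2 ^ 32) = min (d * 2 ^ 33 / v) (2 ^ 33 - 1) := by
    refine pvLoopB_inv (d * 2 ^ 33) v hS0 hv 32 (by omega) 0 (dvd_zero _) le_rfl ?_ ?_
    · exact le_min hdiv0 (by norm_num)
    · have h : min (d * 2 ^ 33 / v) (2 ^ 33 - 1) ≤ 2 ^ 33 - 1 := min_le_right _ _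
      have e : (0:Int) + 2 ^ (32 + 1) = 2 ^ 33 := by norm_num
      linarith
  rw [pv_foldl_const]
  have hlen : (PySem.List.pyRange 32 (-1) (-1)).length = 33 := by decide
  rw [hlen, hS, h32, hB]
  by_cases hdv : d < v
  · have hMlt : d * 2 ^ 33 / v < 2 ^ 33 := by
      rw [Int.ediv_lt_iff_lt_mul hv]
      have : d * 2 ^ 33 < v * 2 ^ 33 := by
        apply mul_lt_mul_of_pos_right hdv; positivity
      linarith
    have hMin : min (d * 2 ^ 33 / v) (2 ^ 33 - 1) = d * 2 ^ 33 / v := by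
      apply min_eq_left; omega
    rw [pv_iterate_lt v d hd hv hdv 33, hMin]
    have hmod : (d * 2 ^ 33) % v = d * 2 ^ 33 - d * 2 ^ 33 / v * v := by
      rw [Int.emod_def]; ring
    rw [hmod]
  · have hMge : (2:Int) ^ 33 ≤ d * 2 ^ 33 / v := by
      rw [Int.le_ediv_iff_mul_le hv]
      have : v * 2 ^ 33 ≤ d * 2 ^ 33 := by
        apply mul_le_mul_of_nonneg_right (by omega); positivity
      linarith
    have hMin : min (d * 2 ^ 33 / v) (2 ^ 33 - 1) = 2 ^ 33 - 1 := by
      apply min_eq_right; omega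
    rw [pv_iterate_ge v d hv (by omega) 33, hMin]

-- ===== VERDICT (by name: the statement is the Claim_ definition above) =====
theorem divisao_comparacao_nao_restauradora_spec : Claim_equal_divisao_comparacao_nao_restauradora := by
  intro dividendo divisor _ hpre
  have hne : divisor ≠ 0 := hpre
  unfold Spec_divisao_comparacao_nao_restauradora
  unfold divisao_comparacao_nao_restauradora divisao_comparacao_nao_restauradora_alt
  rw [if_neg hne, if_neg hne]
  by_cases hd : dividendo < 0 <;> by_cases hv : divisor < 0
  · simp only [if_pos hd, if_pos hv]
    rw [pv_loop_eq (-divisor) (-dividendo) (by omega) (by omega)]; norm_num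
  · simp only [if_pos hd, if_neg hv]
    rw [pv_loop_eq divisor (-dividendo) (by omega) (by omega)]; norm_num
  · simp only [if_neg hd, if_pos hv]
    rw [pv_loop_eq (-divisor) dividendo (by omega) (by omega)]; norm_num
  · simp only [if_neg hd, if_neg hv]
    rw [pv_loop_eq divisor dividendo (by omega) (by omega)]
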